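-- pv_equiv track=rewrite | github.com/SebbyB/Table-Organizer-Scripts | python functions/AccessionCSVGenerator/accngen.py | generate_accession_numbers
-- ===== SOURCE A (Python) =====
-- def generate_accession_numbers(start_prefix, start_mid, start_end, end_mid, end_end):
--     current_mid = start_mid
--     current_end = start_end
--     while current_mid <= end_mid:
--         while current_end <= 999999 and (current_mid < end_mid or current_end <= end_end):
--             yield f"{start_prefix}-{current_mid:03d}-{current_end:06d}"
--             current_end += 1
--         current_mid += 1
--         current_end = 1  # Reset the end part for the next mid value
-- ===== SOURCE B (Python) =====
-- def generate_accession_numbers(start_prefix, start_mid, start_end, end_mid, end_end):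
--     # Rank/unrank: count the total number of accession numbers in closed form,
--     # then produce item k by divmod arithmetic on its global rank (single flat loop).
--     W = 999999
--     if start_mid > end_mid:
--         return
--     first_hi = min(end_end, W) if start_mid == end_mid else W
--     first_count = max(0, first_hi - start_end + 1)
--     if start_mid == end_mid:
--         total = first_count
--     else:
--         total = first_count + W * (end_mid - start_mid - 1) + max(0, min(end_end, W))
--     for k in range(total):
--         if k < first_count:
--             mid, end = start_mid, start_end + k
--         else:
--             j = k - first_count
--             mid, end = start_mid + 1 + j // W, 1 + j % W
--         yield f"{start_prefix}-{mid:03d}-{end:06d}"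
-- ===== Notes on version B (the rewrite author's own statement) =====
-- stated objective: alternative
-- what changed: Replaces A's nested while loops (mutating mid/end counters with a reset) by a rank/unrank algorithm: the total output count is computed in closed form, and a single flat loop over the global rank recovers each item's (mid, end) by divmod arithmetic.
import Mathlib
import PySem

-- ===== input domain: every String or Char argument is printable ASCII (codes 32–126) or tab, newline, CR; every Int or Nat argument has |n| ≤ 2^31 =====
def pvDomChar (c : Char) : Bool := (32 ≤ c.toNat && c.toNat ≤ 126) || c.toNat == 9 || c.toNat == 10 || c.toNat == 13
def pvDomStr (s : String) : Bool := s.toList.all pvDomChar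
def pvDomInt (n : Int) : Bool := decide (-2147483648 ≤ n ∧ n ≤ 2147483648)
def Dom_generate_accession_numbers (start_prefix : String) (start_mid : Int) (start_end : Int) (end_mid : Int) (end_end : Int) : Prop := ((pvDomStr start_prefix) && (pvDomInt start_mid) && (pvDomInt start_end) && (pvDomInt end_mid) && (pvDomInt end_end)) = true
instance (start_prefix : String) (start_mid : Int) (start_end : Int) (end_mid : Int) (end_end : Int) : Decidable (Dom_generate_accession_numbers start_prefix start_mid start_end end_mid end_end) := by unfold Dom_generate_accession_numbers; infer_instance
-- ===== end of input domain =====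

-- ===== PORT A =====
-- B replaces A's nested while loops (mutating mid/end counters with a reset) by a
-- rank/unrank algorithm: count the output in closed form, then one flat loop over the
-- global rank, recovering (mid, end) of each item by divmod (objective: alternative).
-- Both Pythons are generators; equivalence is about the listed sequence of yields.

-- shared formatter: f"{start_prefix}-{mid:03d}-{e:06d}" (same f-string in both Pythons)
def pvFmt (start_prefix : String) (mid e : Int) : String :=
  start_prefix ++ "-" ++ PySem.Str.zfill (PySem.Int.toStr mid) 3 ++ "-" ++ PySem.Str.zfill (PySem.Int.toStr e) 6

-- inner while of A: 'while current_end <= 999999 and (current_mid < end_mid or current_end <= end_end)'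
def pvInnerA (start_prefix : String) (end_mid end_end mid cur : Int) : List String :=
  if cur ≤ 999999 ∧ (mid < end_mid ∨ cur ≤ end_end) then
    pvFmt start_prefix mid cur :: pvInnerA start_prefix end_mid end_end mid (cur + 1)
  else []
termination_by (1000000 - cur).toNat
decreasing_by omega

-- outer while of A: 'while current_mid <= end_mid', then reset current_end to 1
def pvOuterA (start_prefix : String) (end_mid end_end mid cur : Int) : List String :=
  if mid ≤ end_mid then
    pvInnerA start_prefix end_mid end_end mid cur ++ pvOuterA start_prefix end_mid end_end (mid + 1) 1
  else []
termination_by (end_mid + 1 - mid).toNat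
decreasing_by omega

def generate_accession_numbers (start_prefix : String) (start_mid : Int) (start_end : Int) (end_mid : Int) (end_end : Int) : List String :=
  pvOuterA start_prefix end_mid end_end start_mid start_end

-- ===== PORT B =====
-- unrank helper: item of global rank k (k < fc lies in the first mid, the rest by divmod)
def pvUnrank (start_prefix : String) (start_mid start_end fc k : Int) : String :=
  if k < fc then pvFmt start_prefix start_mid (start_end + k)
  else pvFmt start_prefix (start_mid + 1 + PySem.Int.floordiv (k - fc) 999999)
         (1 + PySem.Int.mod (k - fc) 999999)

def generate_accession_numbers_alt (start_prefix : String) (start_mid : Int) (start_end : Int) (end_mid : Int) (end_end : Int) : List String :=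
  if start_mid > end_mid then []
  else
    let firstHi : Int := if start_mid = end_mid then min end_end 999999 else 999999
    let fc : Int := max 0 (firstHi - start_end + 1)
    let total : Int :=
      if start_mid = end_mid then fc
      else fc + 999999 * (end_mid - start_mid - 1) + max 0 (min end_end 999999)
    (PySem.List.pyRange 0 total 1).map (pvUnrank start_prefix start_mid start_end fc)

-- ===== PRECONDITION & SPEC =====
def Spec_generate_accession_numbers (start_prefix : String) (start_mid : Int) (start_end : Int) (end_mid : Int) (end_end : Int) (out : List String) : Prop := out = generate_accession_numbers_alt start_prefix start_mid start_end end_mid end_end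
instance (start_prefix : String) (start_mid : Int) (start_end : Int) (end_mid : Int) (end_end : Int) (out : List String) : Decidable (Spec_generate_accession_numbers start_prefix start_mid start_end end_mid end_end out) := by unfold Spec_generate_accession_numbers; infer_instance

-- ===== CLAIM (what is proved, stated in full; the proofs are below) =====
def Claim_equal_generate_accession_numbers : Prop := ∀ (start_prefix : String) (start_mid : Int) (start_end : Int) (end_mid : Int) (end_end : Int), Dom_generate_accession_numbers start_prefix start_mid start_end end_mid end_end → Spec_generate_accession_numbers start_prefix start_mid start_end end_mid end_end (generate_accession_numbers start_prefix start_mid start_end end_mid end_end)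

-- ===== LEMMAS AND PROOFS =====

-- A's inner while yields exactly the formatted range from cur up to the closed-form bound
theorem pvInnerA_eq (sp : String) (em ee mid cur : Int) :
    pvInnerA sp em ee mid cur =
      (PySem.List.pyRange cur ((if mid < em then (999999 : Int) else min ee 999999) + 1) 1).map
        (pvFmt sp mid) := by
  fun_induction pvInnerA sp em ee mid cur with
  | case1 cur h ih =>
      rw [PySem.List.pyRange_one_cons (by split_ifs <;> omega)]
      simp [ih]
  | case2 cur h =>
      rw [PySem.List.pyRange_one_eq_nil (by split_ifs <;> omega)]
      rfl

-- A's outer while is the flatMap over range(mid, em+1), the inner lower bound being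
-- cur for the first mid and 1 afterwards
theorem pvOuterA_eq (sp : String) (em ee mid cur : Int) :
    pvOuterA sp em ee mid cur =
      (PySem.List.pyRange mid (em + 1) 1).flatMap (fun m =>
        (PySem.List.pyRange (if m = mid then cur else 1)
            ((if m < em then (999999 : Int) else min ee 999999) + 1) 1).map (pvFmt sp m)) := by
  fun_induction pvOuterA sp em ee mid cur with
  | case1 mid cur h ih =>
      rw [PySem.List.pyRange_one_cons (by omega : mid < em + 1), List.flatMap_cons,
        pvInnerA_eq, ih]
      have hcongr : ∀ m ∈ PySem.List.pyRange (mid + 1) (em + 1) 1,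
          (PySem.List.pyRange (if m = mid + 1 then (1 : Int) else 1)
              ((if m < em then (999999 : Int) else min ee 999999) + 1) 1).map (pvFmt sp m) =
          (PySem.List.pyRange (if m = mid then cur else 1)
              ((if m < em then (999999 : Int) else min ee 999999) + 1) 1).map (pvFmt sp m) := by
        intro m hm
        rw [PySem.List.mem_pyRange_one] at hm
        have hne : m ≠ mid := by omega
        simp [hne]
      rw [List.flatMap, List.flatMap, List.map_congr_left hcongr]
      simp
  | case2 mid cur h =>
      rw [PySem.List.pyRange_one_eq_nil (by omega : em + 1 ≤ mid)]
      rfl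

-- shift a map over an integer range to base 0
theorem pvShift (f : Int → String) (a b : Int) :
    (PySem.List.pyRange a b 1).map f
      = (PySem.List.pyRange 0 (b - a) 1).map (fun j => f (a + j)) := by
  simp [PySem.List.pyRange_one, List.map_map, Function.comp_def]

-- one block of the divmod unranker is one mid's full (or final partial) range
theorem pvBlock (sp : String) (base L : Int) (hL : L ≤ 999999) :
    (PySem.List.pyRange 0 L 1).map
        (fun j => pvFmt sp (base + PySem.Int.floordiv j 999999) (1 + PySem.Int.mod j 999999))
      = (PySem.List.pyRange 1 (L + 1) 1).map (pvFmt sp base) := by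
  rw [pvShift (pvFmt sp base) 1 (L + 1)]
  have : L + 1 - 1 = L := by omega
  rw [this]
  apply List.map_congr_left
  intro j hj
  rw [PySem.List.mem_pyRange_one] at hj
  have hdiv : PySem.Int.floordiv j 999999 = 0 := by
    rw [PySem.Int.floordiv_eq_iff_of_pos (by norm_num)]; omega
  have hmod : PySem.Int.mod j 999999 = j := by
    rw [PySem.Int.mod_eq_emod_of_pos (by norm_num)]
    exact Int.emod_eq_of_lt hj.1 (by omega)
  rw [hdiv, hmod, add_zero]

-- the whole divmod tail: n full mids of width 999999 followed by a final partial one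
theorem pvTail (sp : String) (n : Nat) : ∀ (base L : Int), 0 ≤ L → L ≤ 999999 →
    (PySem.List.pyRange 0 (999999 * n + L) 1).map
        (fun j => pvFmt sp (base + PySem.Int.floordiv j 999999) (1 + PySem.Int.mod j 999999))
      = (PySem.List.pyRange base (base + n) 1).flatMap
          (fun m => (PySem.List.pyRange 1 (999999 + 1) 1).map (pvFmt sp m))
        ++ (PySem.List.pyRange 1 (L + 1) 1).map (pvFmt sp (base + n)) := by
  induction n with
  | zero =>
      intro base L h0 hW
      simp only [Nat.cast_zero, mul_zero, zero_add, add_zero]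
      rw [PySem.List.pyRange_one_eq_nil (le_refl base)]
      exact pvBlock sp base L hW
  | succ n ih =>
      intro base L h0 hW
      have hn : (0:Int) ≤ 999999 * (n:Int) := by positivity
      have hsplit : (999999 : Int) * ((n+1 : Nat) : Int) + L
          = 999999 + (999999 * (n:Int) + L) := by push_cast; ring
      rw [hsplit,
        PySem.List.pyRange_one_append 0 999999 (999999 + (999999 * (n:Int) + L))
          (by norm_num) (by omega),
        List.map_append, pvBlock sp base 999999 (le_refl _),
        pvShift _ 999999 (999999 + (999999 * (n:Int) + L))]
      have hred : (999999 : Int) + (999999 * (n:Int) + L) - 999999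
          = 999999 * (n:Int) + L := by ring
      rw [hred]
      have hfun : ∀ j : Int,
          pvFmt sp (base + PySem.Int.floordiv (999999 + j) 999999)
            (1 + PySem.Int.mod (999999 + j) 999999)
          = pvFmt sp ((base + 1) + PySem.Int.floordiv j 999999)
            (1 + PySem.Int.mod j 999999) := by
        intro j
        have hd : PySem.Int.floordiv (999999 + j) 999999
            = PySem.Int.floordiv j 999999 + 1 := by
          rw [PySem.Int.floordiv_eq_ediv_of_pos (by norm_num),
            PySem.Int.floordiv_eq_ediv_of_pos (by norm_num)]
          have := Int.add_mul_ediv_right j 1 (by norm_num : (999999:Int) ≠ 0)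
          simpa [add_comm] using this
        have hm : PySem.Int.mod (999999 + j) 999999 = PySem.Int.mod j 999999 := by
          rw [PySem.Int.mod_eq_emod_of_pos (by norm_num),
            PySem.Int.mod_eq_emod_of_pos (by norm_num)]
          simpa [add_comm] using Int.add_mul_emod_self_left (a := j) (b := 1) (c := 999999)
        rw [hd, hm]; ring_nf
      simp only [hfun]
      rw [ih (base + 1) L h0 hW]
      rw [PySem.List.pyRange_one_cons (by push_cast; omega : base < base + ((n+1 : Nat) : Int)),
        List.flatMap_cons]
      have hbb : base + 1 + (n : Int) = base + ((n+1 : Nat) : Int) := by push_cast; ring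
      rw [hbb, List.append_assoc]

-- two integer ranges with equal base and equal (clamped) lengths are equal
theorem pvRangeCongr (a b b' : Int) (h : (b - a).toNat = (b' - a).toNat) :
    PySem.List.pyRange a b 1 = PySem.List.pyRange a b' 1 := by
  rw [PySem.List.pyRange_one, PySem.List.pyRange_one, h]

-- ===== VERDICT (by name: the statement is the Claim_ definition above) =====
theorem generate_accession_numbers_spec : Claim_equal_generate_accession_numbers := by
  intro sp sm se em ee _
  unfold Spec_generate_accession_numbers generate_accession_numbers generate_accession_numbers_alt
  rw [pvOuterA_eq]
  by_cases hgt : em < sm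
  · rw [PySem.List.pyRange_one_eq_nil (by omega : em + 1 ≤ sm)]
    simp [hgt]
  · by_cases heq : sm = em
    · subst heq
      simp only [lt_irrefl, if_false]
      rw [PySem.List.pyRange_one_cons (by omega : sm < sm + 1),
        PySem.List.pyRange_one_eq_nil (le_refl (sm+1)), List.flatMap_cons,
        List.flatMap_nil, List.append_nil]
      simp only [lt_irrefl, if_false, if_true]
      -- B side: every k in range(0, fc) takes the first branch
      have hcongr : ∀ k ∈ PySem.List.pyRange 0 (max 0 (min ee 999999 - se + 1)) 1,
          pvUnrank sp sm se (max 0 (min ee 999999 - se + 1)) k = pvFmt sp sm (se + k) := by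
        intro k hk
        rw [PySem.List.mem_pyRange_one] at hk
        rw [pvUnrank, if_pos hk.2]
      rw [List.map_congr_left hcongr, pvShift (pvFmt sp sm) se (min ee 999999 + 1),
        pvRangeCongr 0 (min ee 999999 + 1 - se) (max 0 (min ee 999999 - se + 1)) (by omega)]
    · have hlt : sm < em := by omega
      have hnot : ¬ sm > em := by omega
      simp only [if_neg hnot, if_neg heq, gt_iff_lt]
      set fc : Int := max 0 ((999999:Int) - se + 1) with hfc
      set L : Int := max 0 (min ee 999999) with hL
      have hfc0 : 0 ≤ fc := le_max_left _ _
      have hL0 : 0 ≤ L := le_max_left _ _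
      have hLW : L ≤ 999999 := by omega
      have hmid0 : (0:Int) ≤ em - sm - 1 := by omega
      have hmidW : (0:Int) ≤ 999999 * (em - sm - 1) := by positivity
      -- A side: peel the first mid, split the rest at em
      rw [PySem.List.pyRange_one_cons (by omega : sm < em + 1), List.flatMap_cons,
        if_pos rfl, if_pos hlt,
        PySem.List.pyRange_one_append (sm + 1) em (em + 1) (by omega) (by omega),
        List.flatMap_append,
        PySem.List.pyRange_one_cons (by omega : em < em + 1),
        PySem.List.pyRange_one_eq_nil (le_refl (em + 1)), List.flatMap_cons,
        List.flatMap_nil, List.append_nil, if_neg (by omega : ¬ em = sm),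
        if_neg (lt_irrefl em)]
      have hcongrA : ∀ m ∈ PySem.List.pyRange (sm + 1) em 1,
          (PySem.List.pyRange (if m = sm then se else 1)
              ((if m < em then (999999:Int) else min ee 999999) + 1) 1).map (pvFmt sp m)
          = (PySem.List.pyRange 1 (999999 + 1) 1).map (pvFmt sp m) := by
        intro m hm
        rw [PySem.List.mem_pyRange_one] at hm
        rw [if_neg (by omega : ¬ m = sm), if_pos (by omega : m < em)]
      rw [List.flatMap, List.map_congr_left hcongrA, ← List.flatMap]
      -- B side: split range(0, total) at fc
      rw [PySem.List.pyRange_one_append 0 fc (fc + 999999 * (em - sm - 1) + L)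
        hfc0 (by omega), List.map_append]
      have hcongrB1 : ∀ k ∈ PySem.List.pyRange 0 fc 1,
          pvUnrank sp sm se fc k = pvFmt sp sm (se + k) := by
        intro k hk
        rw [PySem.List.mem_pyRange_one] at hk
        rw [pvUnrank, if_pos hk.2]
      rw [List.map_congr_left hcongrB1]
      have hcongrB2 : ∀ k ∈ PySem.List.pyRange fc (fc + 999999 * (em - sm - 1) + L) 1,
          pvUnrank sp sm se fc k
          = pvFmt sp (sm + 1 + PySem.Int.floordiv (k - fc) 999999)
              (1 + PySem.Int.mod (k - fc) 999999) := by
        intro k hk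
        rw [PySem.List.mem_pyRange_one] at hk
        rw [pvUnrank, if_neg (by omega : ¬ k < fc)]
      rw [List.map_congr_left hcongrB2,
        pvShift (fun k => pvFmt sp (sm + 1 + PySem.Int.floordiv (k - fc) 999999)
          (1 + PySem.Int.mod (k - fc) 999999)) fc (fc + 999999 * (em - sm - 1) + L)]
      have hred : fc + 999999 * (em - sm - 1) + L - fc = 999999 * (em - sm - 1) + L := by ring
      rw [hred]
      simp only [add_sub_cancel_left]
      have hcast : (999999:Int) * (em - sm - 1) = 999999 * ((em - sm - 1).toNat : Int) := by
        rw [Int.toNat_of_nonneg hmid0]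
      rw [hcast, pvTail sp (em - sm - 1).toNat (sm + 1) L hL0 hLW]
      have h1 : sm + 1 + ((em - sm - 1).toNat : Int) = em := by
        rw [Int.toNat_of_nonneg hmid0]; ring
      rw [h1]
      -- match the three pieces
      rw [pvShift (pvFmt sp sm) se (999999 + 1),
        pvRangeCongr 0 (999999 + 1 - se) fc (by omega),
        pvRangeCongr 1 (min ee 999999 + 1) (L + 1) (by omega)]
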